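-- pv_equiv track=rewrite | github.com/abdoulayesow/abdoulaye-resume-app-005-2026 | scripts/log-application.py | merge_row
-- ===== SOURCE A (Python) =====
-- PRESERVED_COLUMNS = {"Status", "Applied", "Notes"}
--
-- COLUMN_ORDER = [
--     "Slug", "Company", "Role", "Location",
--     "Status", "Applied", "Closes", "Match", "Salary band", "Notes",
-- ]
--
-- def split_row(row: str) -> list[str]:
--     """Split a Markdown table row into its cell values, trimmed."""
--     inner = row.strip()
--     if inner.startswith("|"):
--         inner = inner[1:]
--     if inner.endswith("|"):
--         inner = inner[:-1]
--     return [c.strip() for c in inner.split("|")]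
--
-- def merge_row(existing: str, fresh: str) -> str:
--     """Merge `fresh` into `existing`, preserving user-managed columns.
--
--     Status, Applied, Notes are kept from existing (so user edits aren't clobbered).
--     All other columns are taken from fresh (re-extracted from analysis.md / ats-audit.md).
--     """
--     existing_cells = split_row(existing)
--     fresh_cells = split_row(fresh)
--     if len(existing_cells) != len(COLUMN_ORDER) or len(fresh_cells) != len(COLUMN_ORDER):
--         return fresh
--     merged = [
--         existing_cells[i] if COLUMN_ORDER[i] in PRESERVED_COLUMNS else fresh_cells[i]
--         for i in range(len(COLUMN_ORDER))
--     ]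
--     return "| " + " | ".join(merged) + " |"
-- ===== SOURCE B (Python) =====
-- PRESERVED_COLUMNS = {"Status", "Applied", "Notes"}
--
-- COLUMN_ORDER = [
--     "Slug", "Company", "Role", "Location",
--     "Status", "Applied", "Closes", "Match", "Salary band", "Notes",
-- ]
--
-- def split_row(row: str) -> list[str]:
--     """Split a Markdown table row into its cell values, trimmed."""
--     inner = row.strip()
--     if inner.startswith("|"):
--         inner = inner[1:]
--     if inner.endswith("|"):
--         inner = inner[:-1]
--     return [c.strip() for c in inner.split("|")]
--
-- def merge_row(existing: str, fresh: str) -> str: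
--     """Merge `fresh` into `existing`, preserving user-managed columns.
--
--     The schema is walked as maximal runs of consecutive columns with the same
--     preserved/non-preserved status; each run is spliced in as one slice of the
--     appropriate source row (existing for preserved runs, fresh otherwise).
--     """
--     existing_cells = split_row(existing)
--     fresh_cells = split_row(fresh)
--     n = len(COLUMN_ORDER)
--     if len(existing_cells) != n or len(fresh_cells) != n:
--         return fresh
--     parts = []
--     i = 0
--     while i < n:
--         pres = COLUMN_ORDER[i] in PRESERVED_COLUMNS
--         j = i
--         while j < n and (COLUMN_ORDER[j] in PRESERVED_COLUMNS) == pres: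
--             j += 1
--         src = existing_cells if pres else fresh_cells
--         parts.extend(src[i:j])
--         i = j
--     return "| " + " | ".join(parts) + " |"
-- ===== Notes on version B (the rewrite author's own statement) =====
-- stated objective: alternative
-- what changed: The merge is re-decomposed as a run-length walk over the schema: maximal runs of consecutive same-status columns are found with a nested while loop and each run is spliced in as one slice of the chosen source row, instead of A's per-index membership-test rebuild over range(n).
import Mathlib
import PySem

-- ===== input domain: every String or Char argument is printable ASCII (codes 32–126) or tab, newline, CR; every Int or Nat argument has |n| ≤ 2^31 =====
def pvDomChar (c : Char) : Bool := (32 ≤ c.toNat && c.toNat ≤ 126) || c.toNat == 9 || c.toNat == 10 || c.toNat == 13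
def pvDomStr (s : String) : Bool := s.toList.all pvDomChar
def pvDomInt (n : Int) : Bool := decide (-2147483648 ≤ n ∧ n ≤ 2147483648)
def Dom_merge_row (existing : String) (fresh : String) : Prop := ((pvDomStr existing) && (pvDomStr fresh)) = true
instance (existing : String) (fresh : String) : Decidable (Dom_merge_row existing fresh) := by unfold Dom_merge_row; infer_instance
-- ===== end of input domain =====

-- B walks the schema as maximal runs of same preserved-status columns and splices whole
-- slices of the chosen source row, instead of A's per-index membership-test rebuild;
-- objective: alternative decomposition, same cost. Total: no Pre_ needed.

-- shared module-level constants and helper (identical in Source A and Source B)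
def PRESERVED_COLUMNS : PySem.Set String := PySem.Set.ofList ["Status", "Applied", "Notes"]

def COLUMN_ORDER : List String :=
  ["Slug", "Company", "Role", "Location",
   "Status", "Applied", "Closes", "Match", "Salary band", "Notes"]

def split_row (row : String) : List String :=
  let inner := PySem.Str.strip row
  let inner := if PySem.Str.startswith inner "|" then PySem.Str.slice inner (some 1) none else inner
  let inner := if PySem.Str.endswith inner "|" then PySem.Str.slice inner none (some (-1)) else inner
  -- inner.split("|"): sep ≠ "" so split? is always `some`
  ((PySem.Str.split? inner "|").getD []).map PySem.Str.strip

-- ===== PORT A =====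
def merge_row (existing : String) (fresh : String) : String :=
  let existing_cells := split_row existing
  let fresh_cells := split_row fresh
  if existing_cells.length ≠ COLUMN_ORDER.length ∨ fresh_cells.length ≠ COLUMN_ORDER.length then
    fresh
  else
    -- list comprehension over range(len(COLUMN_ORDER)); every index is in range, so
    -- xs[i] is List.getD i "" (exact here: i < length on both lists)
    let merged := (List.range COLUMN_ORDER.length).map (fun i =>
      if (COLUMN_ORDER.getD i "") ∈ PRESERVED_COLUMNS then existing_cells.getD i ""
      else fresh_cells.getD i "")
    "| " ++ PySem.Str.join " | " merged ++ " |"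

-- ===== PORT B =====
-- inner while loop of Source B: advance j while the column's preserved-status equals `pres`
-- (the while loops are written with a structural fuel guard of COLUMN_ORDER.length steps,
-- which both loops provably never exhaust: j advances by 1, and the outer i jumps past
-- each run; the fuel only makes the same computation structurally total)
def runEnd (fuel : Nat) (pres : Bool) (j : Nat) : Nat :=
  match fuel with
  | 0 => j
  | fuel + 1 =>
    if j < COLUMN_ORDER.length ∧ decide ((COLUMN_ORDER.getD j "") ∈ PRESERVED_COLUMNS) = pres then
      runEnd fuel pres (j + 1)
    else j

-- outer while loop of Source B, with the `parts` accumulator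
-- (i, j are non-negative ints; src[i:j] is exact as PySem.List.slice with the Nat casts)
def mergeLoop (ec fc : List String) (fuel : Nat) (i : Nat) (parts : List String) : List String :=
  match fuel with
  | 0 => parts
  | fuel + 1 =>
    if i < COLUMN_ORDER.length then
      let pres := decide ((COLUMN_ORDER.getD i "") ∈ PRESERVED_COLUMNS)
      let j := runEnd COLUMN_ORDER.length pres i
      let src := if pres then ec else fc
      mergeLoop ec fc fuel j (parts ++ PySem.List.slice src (some (i : Int)) (some (j : Int)))
    else parts

def merge_row_alt (existing : String) (fresh : String) : String :=
  let existing_cells := split_row existing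
  let fresh_cells := split_row fresh
  if existing_cells.length ≠ COLUMN_ORDER.length ∨ fresh_cells.length ≠ COLUMN_ORDER.length then
    fresh
  else
    let parts := mergeLoop existing_cells fresh_cells COLUMN_ORDER.length 0 []
    "| " ++ PySem.Str.join " | " parts ++ " |"

-- ===== PRECONDITION & SPEC =====
def Spec_merge_row (existing : String) (fresh : String) (out : String) : Prop := out = merge_row_alt existing fresh
instance (existing : String) (fresh : String) (out : String) : Decidable (Spec_merge_row existing fresh out) := by unfold Spec_merge_row; infer_instance

-- ===== CLAIM (what is proved, stated in full; the proofs are below) =====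
def Claim_equal_merge_row : Prop := ∀ (existing : String) (fresh : String), Dom_merge_row existing fresh → Spec_merge_row existing fresh (merge_row existing fresh)

-- ===== LEMMAS AND PROOFS =====

-- On cell lists of the schema's length the per-index rebuild and the run-splicing loop
-- build the same list (the schema is a concrete 10-column list, so both sides reduce).
theorem merged_eq (ec fc : List String) (h1 : ec.length = COLUMN_ORDER.length)
    (h2 : fc.length = COLUMN_ORDER.length) :
    (List.range COLUMN_ORDER.length).map (fun i =>
      if (COLUMN_ORDER.getD i "") ∈ PRESERVED_COLUMNS then ec.getD i "" else fc.getD i "")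
    = mergeLoop ec fc COLUMN_ORDER.length 0 [] := by
  simp only [COLUMN_ORDER, List.length_cons, List.length_nil] at h1 h2
  rcases ec with _ | ⟨a0, _ | ⟨a1, _ | ⟨a2, _ | ⟨a3, _ | ⟨a4, _ | ⟨a5, _ | ⟨a6, _ | ⟨a7, _ | ⟨a8, _ | ⟨a9, ect⟩⟩⟩⟩⟩⟩⟩⟩⟩⟩ <;>
    simp only [List.length_cons, List.length_nil] at h1 <;> try omega
  rcases fc with _ | ⟨b0, _ | ⟨b1, _ | ⟨b2, _ | ⟨b3, _ | ⟨b4, _ | ⟨b5, _ | ⟨b6, _ | ⟨b7, _ | ⟨b8, _ | ⟨b9, fct⟩⟩⟩⟩⟩⟩⟩⟩⟩⟩ <;>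
    simp only [List.length_cons, List.length_nil] at h2 <;> try omega
  have hec : ect = [] := List.eq_nil_of_length_eq_zero (by omega)
  have hfc : fct = [] := List.eq_nil_of_length_eq_zero (by omega)
  subst hec hfc
  rfl

-- ===== VERDICT (by name: the statement is the Claim_ definition above) =====
theorem merge_row_spec : Claim_equal_merge_row := by
  intro existing fresh _
  unfold Spec_merge_row merge_row merge_row_alt
  by_cases h : (split_row existing).length ≠ COLUMN_ORDER.length ∨
      (split_row fresh).length ≠ COLUMN_ORDER.length
  · simp only [h, if_true]
  · simp only [h, if_false]
    push Not at h
    rw [merged_eq _ _ h.1 h.2]
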